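-- pv_equiv track=rewrite | github.com/kaihatsuRONIT/365-Days-Of-Code | 365DOC(Day011).py | solve
-- ===== SOURCE A (Python) =====
-- def solve(A, B, C):
--         fine=0
--         if(B%2==0):
--             for i in A:
--                 if(i%2!=0):
--                     fine=fine+C
--             return fine
--         elif(B%2!=0):
--             for i in A:
--                 if(i%2==0):
--                     fine=fine+C
--             return fine
-- ===== SOURCE B (Python) =====
-- def solve(A, B, C):
--     # Divide and conquer: an element i owes the fine exactly when i+B is odd
--     # (B even -> odd elements, B odd -> even elements); split, recurse, add.
--     if not A:
--         return 0
--     if len(A) == 1: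
--         return C if (A[0] + B) % 2 == 1 else 0
--     m = len(A) // 2
--     return solve(A[:m], B, C) + solve(A[m:], B, C)
-- ===== Notes on version B (the rewrite author's own statement) =====
-- stated objective: alternative
-- what changed: Replaces A's two branch-selected accumulation loops with a divide-and-conquer recursion that splits the list in half, decides each singleton by the combined parity (i+B)%2, and adds the two halves' fines.
import Mathlib
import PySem

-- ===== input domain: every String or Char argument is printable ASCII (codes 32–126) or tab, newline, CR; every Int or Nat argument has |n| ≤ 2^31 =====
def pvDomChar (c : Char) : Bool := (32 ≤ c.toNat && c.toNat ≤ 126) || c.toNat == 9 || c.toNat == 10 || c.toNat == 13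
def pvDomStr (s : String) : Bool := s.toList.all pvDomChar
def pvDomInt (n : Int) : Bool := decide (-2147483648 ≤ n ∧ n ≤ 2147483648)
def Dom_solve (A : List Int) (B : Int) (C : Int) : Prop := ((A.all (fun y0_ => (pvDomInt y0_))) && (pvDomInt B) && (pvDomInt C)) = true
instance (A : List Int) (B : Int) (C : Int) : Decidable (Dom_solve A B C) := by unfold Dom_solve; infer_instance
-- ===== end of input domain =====

-- B replaces A's branch-selected accumulation loops with a divide-and-conquer recursion on list halves deciding singletons by (i+B)%2 (objective: alternative).


-- ===== PORT A =====
def solve (A : List Int) (B : Int) (C : Int) : Int :=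
  if PySem.Int.mod B 2 = 0 then
    A.foldl (fun fine i => if PySem.Int.mod i 2 ≠ 0 then fine + C else fine) 0
  else
    A.foldl (fun fine i => if PySem.Int.mod i 2 = 0 then fine + C else fine) 0

-- ===== PORT B =====
def solve_alt (A : List Int) (B : Int) (C : Int) : Int :=
  if h0 : A = [] then 0
  else if h1 : A.length = 1 then
    if PySem.Int.mod (A[0]'(by omega) + B) 2 = 1 then C else 0
  else
    let m : Nat := A.length / 2
    solve_alt (PySem.List.slice A none (some (m : Int))) B C
      + solve_alt (PySem.List.slice A (some (m : Int)) none) B C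
termination_by A.length
decreasing_by
  · rw [PySem.List.slice_to_natCast]
    have hA : 2 ≤ A.length := by
      cases A with
      | nil => simp at h0
      | cons a t => cases t with
        | nil => simp at h1
        | cons b u => simp
    simp [List.length_take]; omega
  · rw [PySem.List.slice_from_natCast]
    have hA : 2 ≤ A.length := by
      cases A with
      | nil => simp at h0
      | cons a t => cases t with
        | nil => simp at h1
        | cons b u => simp
    simp [List.length_drop]; omega

-- ===== PRECONDITION & SPEC =====
def Spec_solve (A : List Int) (B : Int) (C : Int) (out : Int) : Prop := out = solve_alt A B C
instance (A : List Int) (B : Int) (C : Int) (out : Int) : Decidable (Spec_solve A B C out) := by unfold Spec_solve; infer_instance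

-- ===== CLAIM (what is proved, stated in full; the proofs are below) =====
def Claim_equal_solve : Prop := ∀ (A : List Int) (B : Int) (C : Int), Dom_solve A B C → Spec_solve A B C (solve A B C)

-- ===== LEMMAS AND PROOFS =====

theorem pv_mod_emod (x : Int) : PySem.Int.mod x 2 = x % 2 := by
  simp [PySem.Int.mod, Int.fmod_eq_emod_of_nonneg x (by norm_num : (0:Int) ≤ 2)]

theorem pv_foldl_sum (p : Int → Prop) [DecidablePred p] (C : Int) :
    ∀ (l : List Int) (acc : Int),
      l.foldl (fun fine i => if p i then fine + C else fine) acc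
        = acc + (l.map (fun i => if p i then C else 0)).sum := by
  intro l
  induction l with
  | nil => simp
  | cons a t ih =>
    intro acc
    by_cases h : p a
    · simp [h, ih]; ring
    · simp [h, ih]

theorem solve_alt_sum (B C : Int) :
    ∀ (n : Nat) (l : List Int), l.length ≤ n →
      solve_alt l B C = (l.map (fun i => if (i + B) % 2 = 1 then C else 0)).sum := by
  intro n
  induction n with
  | zero =>
    intro l h
    have : l = [] := by cases l <;> simp_all
    subst this
    rw [solve_alt]; simp
  | succ n ih =>
    intro l h
    rw [solve_alt]
    by_cases h0 : l = []
    · simp [h0]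
    · by_cases h1 : l.length = 1
      · obtain ⟨x, rfl⟩ : ∃ x, l = [x] := by
          cases l with
          | nil => simp at h0
          | cons a t => cases t with
            | nil => exact ⟨a, rfl⟩
            | cons b u => simp at h1
        simp [h0, h1]
      · have hA : 2 ≤ l.length := by
          cases l with
          | nil => simp at h0
          | cons a t => cases t with
            | nil => simp at h1
            | cons b u => simp
        simp only [h0, h1, dite_false]
        rw [PySem.List.slice_to_natCast, PySem.List.slice_from_natCast]
        rw [ih _ (by simp [List.length_take]; omega),
            ih _ (by simp [List.length_drop]; omega)]
        rw [← List.sum_append, ← List.map_append, List.take_append_drop]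

-- ===== VERDICT (by name: the statement is the Claim_ definition above) =====
theorem solve_spec : Claim_equal_solve := by
  intro A B C _
  show solve A B C = solve_alt A B C
  rw [solve_alt_sum B C A.length A (le_refl _)]
  unfold solve
  simp only [pv_mod_emod]
  by_cases hB : B % 2 = 0
  · rw [if_pos hB, pv_foldl_sum (fun i => i % 2 ≠ 0) C A 0, zero_add]
    congr 1
    apply List.map_congr_left
    intro i _
    by_cases hi : i % 2 = 0 <;> simp_all <;> omega
  · rw [if_neg hB, pv_foldl_sum (fun i => i % 2 = 0) C A 0, zero_add]
    congr 1
    apply List.map_congr_left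
    intro i _
    by_cases hi : i % 2 = 0 <;> simp_all <;> omega
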